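-- pv_equiv track=rewrite | github.com/XMUhe/auto-debug-framework | auto_fix_multilang.py | find_string_end
-- ===== SOURCE A (Python) =====
-- def find_string_end(s, start):
--     """找到字符串结束位置（处理转义引号）"""
--     i = start
--     while i < len(s):
--         if s[i] == '\\' and i + 1 < len(s):
--             i += 2  # 跳过转义字符
--         elif s[i] == '"':
--             return i
--         else:
--             i += 1
--     return -1
-- ===== SOURCE B (Python) =====
-- def find_string_end(s, start):
--     """找到字符串结束位置（处理转义引号）"""
--     # Quote-directed search: for each quote candidate, count the backslash run
--     # immediately before it (bounded below by start); the quote closes the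
--     # string iff that run has even length.
--     for q in range(start, len(s)):
--         if s[q] == '"':
--             k = q
--             while k > start and s[k - 1] == '\\':
--                 k -= 1
--             if (q - k) % 2 == 0:
--                 return q
--     return -1
-- ===== Notes on version B (the rewrite author's own statement) =====
-- stated objective: faster
-- what changed: Replaces A's forward escape-state scan (i += 2 jumps over escaped chars) by a quote-directed search: iterate over quote candidates and accept the first one whose immediately preceding backslash run (bounded below by start) has even length.
-- outside the precondition, e.g. on find_string_end('abc', -5): A raises IndexError, B raises IndexError
import Mathlib
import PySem

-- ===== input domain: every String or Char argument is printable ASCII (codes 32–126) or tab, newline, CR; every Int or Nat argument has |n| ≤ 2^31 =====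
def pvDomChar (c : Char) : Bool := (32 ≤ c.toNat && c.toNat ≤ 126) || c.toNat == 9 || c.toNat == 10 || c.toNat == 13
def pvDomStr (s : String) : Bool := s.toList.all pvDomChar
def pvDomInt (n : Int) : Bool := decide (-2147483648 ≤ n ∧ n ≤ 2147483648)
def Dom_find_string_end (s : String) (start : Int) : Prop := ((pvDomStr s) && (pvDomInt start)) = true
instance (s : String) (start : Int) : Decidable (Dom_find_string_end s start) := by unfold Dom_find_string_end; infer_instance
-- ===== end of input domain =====

-- B replaces A's forward escape-state machine (i += 2 jumps) by a quote-directed search: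
-- scan quote candidates and, for each, check the parity of the backslash run just before it
-- (objective: a different algorithm, intended to be faster by a constant factor).

-- ===== PORT A =====
-- A's while-loop: i advances by 2 (escape), returns i (closing quote), or advances by 1.
-- pyGet? = none is Python's IndexError (excluded by Pre_); the port returns a junk 0 there.
def find_string_end_A_loop (cs : List Char) (i : Int) : Int :=
  if _h : i < (cs.length : Int) then
    match PySem.List.pyGet? cs i with
    | none => 0
    | some c =>
      if c = '\\' ∧ i + 1 < (cs.length : Int) then find_string_end_A_loop cs (i + 2)
      else if c = '"' then i
      else find_string_end_A_loop cs (i + 1)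
  else -1
termination_by ((cs.length : Int) - i).toNat
decreasing_by all_goals omega

def find_string_end (s : String) (start : Int) : Int :=
  find_string_end_A_loop s.toList start

-- ===== PORT B =====
-- Source B's inner while: walk k down over the backslash run ending at k-1, bounded below by b.
def find_string_end_run (cs : List Char) (b : Int) (k : Int) : Int :=
  if _h : b < k ∧ PySem.List.pyGet? cs (k - 1) = some '\\' then
    find_string_end_run cs b (k - 1)
  else k
termination_by (k - b).toNat
decreasing_by omega

-- Source B's for-loop over range(start, len(s)): per quote candidate, run-parity check.
def find_string_end_B_loop (cs : List Char) (b : Int) : List Int → Int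
  | [] => -1
  | q :: rest =>
    match PySem.List.pyGet? cs q with
    | none => 0  -- IndexError junk (excluded by Pre_)
    | some c =>
      if c = '"' then
        let k := find_string_end_run cs b q
        if PySem.Int.mod (q - k) 2 = 0 then q else find_string_end_B_loop cs b rest
      else find_string_end_B_loop cs b rest

def find_string_end_alt (s : String) (start : Int) : Int :=
  find_string_end_B_loop s.toList start
    (PySem.List.pyRange start (s.toList.length : Int) 1)

-- ===== PRECONDITION & SPEC =====
-- Pre_ excludes exactly start < -len(s), where Python A raises IndexError (s[i] with i < -len).
def Pre_find_string_end (s : String) (start : Int) : Prop := -(s.toList.length : Int) ≤ start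
instance (s : String) (start : Int) : Decidable (Pre_find_string_end s start) := by
  unfold Pre_find_string_end; infer_instance

def pvWitness_find_string_end : String × Int := ("ab\\\"c\"d", 0)

def Spec_find_string_end (s : String) (start : Int) (out : Int) : Prop := out = find_string_end_alt s start
instance (s : String) (start : Int) (out : Int) : Decidable (Spec_find_string_end s start out) := by unfold Spec_find_string_end; infer_instance

-- ===== CLAIM (what is proved, stated in full; the proofs are below) =====
def Claim_equal_find_string_end : Prop := ∀ (s : String) (start : Int), Dom_find_string_end s start → Pre_find_string_end s start → Spec_find_string_end s start (find_string_end s start)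

-- ===== LEMMAS AND PROOFS =====

-- One-step unfolding of the inner while-loop, as a plain ite.
theorem run_unfold (cs : List Char) (b k : Int) :
    find_string_end_run cs b k
      = if b < k ∧ PySem.List.pyGet? cs (k - 1) = some '\\' then
          find_string_end_run cs b (k - 1)
        else k := by
  rw [find_string_end_run, dite_eq_ite]

-- The run-start never goes below the bound nor above its argument.
theorem run_bounds (cs : List Char) (b k : Int) (hk : b ≤ k) :
    b ≤ find_string_end_run cs b k ∧ find_string_end_run cs b k ≤ k := by
  induction k using find_string_end_run.induct cs b with
  | case1 k h ih =>
      rw [run_unfold, if_pos h]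
      exact ⟨(ih (by omega)).1, by have := (ih (by omega)).2; omega⟩
  | case2 k h =>
      rw [run_unfold, if_neg h]; omega

-- Stepping the lower bound past a non-backslash char does not change the run-start.
theorem run_bound_step1 (cs : List Char) (b : Int)
    (hb : PySem.List.pyGet? cs b ≠ some '\\') (q : Int) (hq : b + 1 ≤ q) :
    find_string_end_run cs b q = find_string_end_run cs (b + 1) q := by
  induction hn : (q - (b + 1)).toNat using Nat.strong_induction_on generalizing q with
  | _ n ih =>
  by_cases h2 : b + 1 < q ∧ PySem.List.pyGet? cs (q - 1) = some '\\'
  · rw [run_unfold cs b q, if_pos ⟨by omega, h2.2⟩, run_unfold cs (b + 1) q, if_pos h2]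
    exact ih ((q - 1) - (b + 1)).toNat (by omega) (q - 1) (by omega) rfl
  · by_cases h1 : b < q ∧ PySem.List.pyGet? cs (q - 1) = some '\\'
    · -- then q - 1 = b, so s[q-1] = s[b] would be a backslash: contradiction
      exfalso
      obtain ⟨hbq, hbs⟩ := h1
      have hq1 : ¬ (b + 1 < q) := fun hlt => h2 ⟨hlt, hbs⟩
      have hqb : q - 1 = b := by omega
      exact hb (hqb ▸ hbs)
    · rw [run_unfold cs b q, if_neg h1, run_unfold cs (b + 1) q, if_neg h2]

-- Stepping the lower bound past a backslash by 2 changes the run-start by 0 or 2.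
theorem run_bound_step2 (cs : List Char) (b : Int)
    (hb : PySem.List.pyGet? cs b = some '\\') (q : Int) (hq : b + 2 ≤ q) :
    find_string_end_run cs b q = find_string_end_run cs (b + 2) q ∨
    find_string_end_run cs b q = find_string_end_run cs (b + 2) q - 2 := by
  induction hn : (q - (b + 2)).toNat using Nat.strong_induction_on generalizing q with
  | _ n ih =>
  by_cases h2 : b + 2 < q ∧ PySem.List.pyGet? cs (q - 1) = some '\\'
  · rw [run_unfold cs b q, if_pos ⟨by omega, h2.2⟩, run_unfold cs (b + 2) q, if_pos h2]
    exact ih ((q - 1) - (b + 2)).toNat (by omega) (q - 1) (by omega) rfl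
  · -- here either q = b + 2, or the char before q is not a backslash
    by_cases hq2 : q = b + 2
    · subst hq2
      rw [run_unfold cs (b + 2) (b + 2), if_neg (fun h => absurd h.1 (by omega))]
      by_cases h1 : PySem.List.pyGet? cs (b + 2 - 1) = some '\\'
      · -- run from bound b walks b+2 → b+1 → b
        rw [run_unfold cs b (b + 2), if_pos ⟨by omega, h1⟩, show b + 2 - 1 = b + 1 by omega,
            run_unfold cs b (b + 1),
            if_pos ⟨by omega, by rw [show b + 1 - 1 = b by omega]; exact hb⟩,
            show b + 1 - 1 = b by omega,
            run_unfold cs b b, if_neg (fun h => absurd h.1 (by omega))]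
        right; omega
      · rw [run_unfold cs b (b + 2), if_neg (fun h => h1 h.2)]
        left; rfl
    · have h1 : ¬ (b < q ∧ PySem.List.pyGet? cs (q - 1) = some '\\') := by
        rintro ⟨_, hcc⟩; exact h2 ⟨by omega, hcc⟩
      rw [run_unfold cs b q, if_neg h1, run_unfold cs (b + 2) q, if_neg h2]
      left; rfl

-- B's loop gives the same answer for two lower bounds whose run-starts agree mod 2.
theorem B_loop_congr (cs : List Char) (b b' : Int) (l : List Int)
    (h : ∀ q ∈ l, PySem.Int.mod (q - find_string_end_run cs b q) 2
                = PySem.Int.mod (q - find_string_end_run cs b' q) 2) :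
    find_string_end_B_loop cs b l = find_string_end_B_loop cs b' l := by
  induction l with
  | nil => rfl
  | cons q rest ih =>
    have hrest : ∀ x ∈ rest, PySem.Int.mod (x - find_string_end_run cs b x) 2
                = PySem.Int.mod (x - find_string_end_run cs b' x) 2 :=
      fun x hx => h x (List.mem_cons_of_mem _ hx)
    simp only [find_string_end_B_loop]
    cases PySem.List.pyGet? cs q with
    | none => rfl
    | some c =>
      by_cases hc : c = '"'
      · simp only [hc, h q (List.mem_cons_self), ih hrest]
      · simp only [if_neg hc, ih hrest]

-- Every element of pyRange a n 1 is at least a.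
theorem pyRange_mem_ge (a n : Int) (q : Int) (hq : q ∈ PySem.List.pyRange a n 1) : a ≤ q := by
  induction hm : (n - a).toNat using Nat.strong_induction_on generalizing a with
  | _ m ih =>
  by_cases h : a < n
  · rw [PySem.List.pyRange_one_cons h] at hq
    rcases List.mem_cons.mp hq with h1 | h1
    · omega
    · have := ih ((n - (a + 1)).toNat) (by omega) (a + 1) h1 rfl; omega
  · rw [PySem.List.pyRange_one_eq_nil (by omega)] at hq
    simp at hq

-- Step lemmas reducing one element of B's loop (proved by unfolding).
theorem B_loop_cons_skip (cs : List Char) (b q : Int) (rest : List Int) (c : Char)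
    (hm : PySem.List.pyGet? cs q = some c) (hq : c ≠ '"') :
    find_string_end_B_loop cs b (q :: rest) = find_string_end_B_loop cs b rest := by
  simp [find_string_end_B_loop, hm, hq]

theorem B_loop_cons_quote (cs : List Char) (b q : Int) (rest : List Int)
    (hm : PySem.List.pyGet? cs q = some '"') :
    find_string_end_B_loop cs b (q :: rest)
      = if PySem.Int.mod (q - find_string_end_run cs b q) 2 = 0 then q
        else find_string_end_B_loop cs b rest := by
  simp [find_string_end_B_loop, hm]

-- Main lemma: A's scan from i equals B's quote-directed search with lower bound i.
theorem find_string_end_loops_eq (cs : List Char) (i : Int) :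
    find_string_end_A_loop cs i
      = find_string_end_B_loop cs i (PySem.List.pyRange i (cs.length : Int) 1) := by
  induction i using find_string_end_A_loop.induct cs with
  | case1 i h hm =>
      -- IndexError junk branch (outside Pre_): both return 0
      rw [find_string_end_A_loop, PySem.List.pyRange_one_cons h]
      simp [find_string_end_B_loop, hm, h]
  | case2 i h c hm hc ih =>
      -- s[i] = '\\' with i+1 < len: A jumps to i+2
      rw [find_string_end_A_loop]
      simp only [dif_pos h]
      rw [hm]
      simp only [if_pos hc]
      obtain ⟨hc1, hc2⟩ := hc
      subst hc1
      rw [ih, PySem.List.pyRange_one_cons h,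
          B_loop_cons_skip cs i i _ _ hm (by decide),
          PySem.List.pyRange_one_cons hc2]
      have hrun1 : find_string_end_run cs i (i + 1) = i := by
        rw [run_unfold cs i (i + 1),
            if_pos ⟨by omega, by rw [show i + 1 - 1 = i by omega]; exact hm⟩,
            show i + 1 - 1 = i by omega,
            run_unfold cs i i, if_neg (fun hx => absurd hx.1 (by omega))]
      have hir : ¬ PySem.List.pyGet? cs i = none := by rw [hm]; simp
      rw [PySem.List.pyGet?_eq_none_iff, not_not] at hir
      have hg' : ¬ PySem.List.pyGet? cs (i + 1) = none := by
        rw [PySem.List.pyGet?_eq_none_iff, not_not]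
        simp [PySem.Raise.InRange] at hir ⊢
        omega
      obtain ⟨c1, hg⟩ := Option.ne_none_iff_exists'.mp hg'
      have hskip : find_string_end_B_loop cs i ((i + 1) :: PySem.List.pyRange (i + 1 + 1) (cs.length : Int) 1)
          = find_string_end_B_loop cs i (PySem.List.pyRange (i + 2) (cs.length : Int) 1) := by
        by_cases hq : c1 = '"'
        · subst hq
          rw [B_loop_cons_quote cs i (i + 1) _ hg, hrun1, show i + 1 - i = 1 by omega]
          rw [if_neg (by decide), show i + 1 + 1 = i + 2 by ring]
        · rw [B_loop_cons_skip cs i (i + 1) _ _ hg hq, show i + 1 + 1 = i + 2 by ring]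
      rw [hskip]
      -- shift the lower bound from i to i+2 (parity of run-starts is preserved)
      refine (B_loop_congr cs i (i + 2) _ ?_).symm
      intro q hq
      have hge : i + 2 ≤ q := pyRange_mem_ge _ _ _ hq
      rcases run_bound_step2 cs i hm q hge with h2 | h2
      · rw [h2]
      · rw [h2]
        have hb1 := run_bounds cs (i + 2) q (by omega)
        rw [PySem.Int.mod_eq_emod_of_pos (by omega),
            PySem.Int.mod_eq_emod_of_pos (by omega)]
        omega
  | case3 i h hm hc =>
      -- s[i] = '"': both return i
      rw [find_string_end_A_loop]
      simp only [dif_pos h]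
      rw [hm]
      simp only [if_neg hc, if_true]
      have hrun : find_string_end_run cs i i = i := by
        rw [run_unfold cs i i, if_neg (fun hx => absurd hx.1 (by omega))]
      rw [PySem.List.pyRange_one_cons h, B_loop_cons_quote cs i i _ hm, hrun]
      have hz : PySem.Int.mod (i - i) 2 = 0 := by
        rw [PySem.Int.mod_eq_emod_of_pos (by omega : (0:Int) < 2)]; omega
      rw [if_pos hz]
  | case4 i h c hm hc hq ih =>
      -- ordinary char (or a trailing backslash): step by 1
      rw [find_string_end_A_loop]
      simp only [dif_pos h]
      rw [hm]
      simp only [if_neg hc, if_neg hq]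
      rw [ih, PySem.List.pyRange_one_cons h, B_loop_cons_skip cs i i _ _ hm hq]
      by_cases hlast : i + 1 < (cs.length : Int)
      · -- in this branch s[i] is not '\\' (else A would have jumped); shift bound by 1
        have hnb : PySem.List.pyGet? cs i ≠ some '\\' := by
          intro hbs
          rw [hm] at hbs
          exact hc ⟨Option.some.inj hbs, hlast⟩
        refine (B_loop_congr cs i (i + 1) _ ?_).symm
        intro q hq'
        rw [run_bound_step1 cs i hnb q (pyRange_mem_ge _ _ _ hq')]
      · -- i is the last index: both remaining ranges are empty
        rw [PySem.List.pyRange_one_eq_nil (by omega)]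
        rfl
  | case5 i h =>
      rw [find_string_end_A_loop, dif_neg h, PySem.List.pyRange_one_eq_nil (by omega)]
      rfl

-- ===== VERDICT (by name: the statement is the Claim_ definition above) =====
theorem find_string_end_spec : Claim_equal_find_string_end := by
  intro s start _ _
  unfold Spec_find_string_end find_string_end find_string_end_alt
  exact find_string_end_loops_eq s.toList start
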